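-- pv_equiv track=rewrite | github.com/deniscostadsc/playground | solutions/beecrowd/1077/1077.py | stack_terms
-- ===== SOURCE A (Python) =====
-- def is_operator(char):
--     return char in ['+', '-', '*', '/', '^']
--
-- def is_opening_parenthesis(char):
--     return char == '('
--
-- def is_closing_parenthesis(char):
--     return char == ')'
--
-- def is_parenthesis(char):
--     return char in '()'
--
-- def is_operand(char):
--     return not is_operator(char) and not is_parenthesis(char)
--
-- def stack_terms(line, line_cursor, operation_stack):
--     if is_operand(line[line_cursor]):
--         operation_stack.append(line[line_cursor])
--         line_cursor += 1
--         return line_cursor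
--
--     if is_operator(line[line_cursor]):
--         operator = line[line_cursor]
--         line_cursor = stack_terms(line, line_cursor + 1, operation_stack)
--         operation_stack.append(operator)
--         return line_cursor
--
--     if is_parenthesis(line[line_cursor]):
--         line_cursor += 1
--         parenthesis_depth = 1
--         sub_expression = ''
--
--         for char in line[line_cursor:]:
--             if is_opening_parenthesis(char):
--                 parenthesis_depth += 1
--             elif is_closing_parenthesis(char) and parenthesis_depth == 1:
--                 parenthesis_depth -= 1
--                 operation_stack.append(sub_expression)
--                 line_cursor += 1
--                 break
--             elif is_closing_parenthesis(char):
--                 parenthesis_depth -= 1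
--             else:
--                 sub_expression += line[line_cursor]
--
--             line_cursor += 1
--
--         return line_cursor
-- ===== SOURCE B (Python) =====
-- def is_operator(char):
--     return char in ['+', '-', '*', '/', '^']
--
--
-- def stack_terms(line, line_cursor, operation_stack):
--     # Iterative: collect the chain of prefix operators, handle the single
--     # base term (operand or parenthesised sub-expression), then append the
--     # collected operators innermost-first.
--     operators = []
--     while is_operator(line[line_cursor]):
--         operators.append(line[line_cursor])
--         line_cursor += 1
--
--     if line[line_cursor] not in '()':
--         operation_stack.append(line[line_cursor])
--         line_cursor += 1
--     else:
--         line_cursor += 1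
--         parenthesis_depth = 1
--         sub_expression = ''
--         for char in line[line_cursor:]:
--             if char == '(':
--                 parenthesis_depth += 1
--             elif char == ')' and parenthesis_depth == 1:
--                 parenthesis_depth -= 1
--                 operation_stack.append(sub_expression)
--                 line_cursor += 1
--                 break
--             elif char == ')':
--                 parenthesis_depth -= 1
--             else:
--                 sub_expression += line[line_cursor]
--             line_cursor += 1
--
--     while operators:
--         operation_stack.append(operators.pop())
--     return line_cursor
-- ===== Notes on version B (the rewrite author's own statement) =====
-- stated objective: alternative
-- what changed: Replaces A's linear recursion (one call per leading operator, appending each operator after the recursive call returns) by an iterative pass: a while loop collects the operator chain into a local list, the single base term is handled once, and the collected operators are appended in reverse; the parenthesis-depth scan is kept identical.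
import Mathlib
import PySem

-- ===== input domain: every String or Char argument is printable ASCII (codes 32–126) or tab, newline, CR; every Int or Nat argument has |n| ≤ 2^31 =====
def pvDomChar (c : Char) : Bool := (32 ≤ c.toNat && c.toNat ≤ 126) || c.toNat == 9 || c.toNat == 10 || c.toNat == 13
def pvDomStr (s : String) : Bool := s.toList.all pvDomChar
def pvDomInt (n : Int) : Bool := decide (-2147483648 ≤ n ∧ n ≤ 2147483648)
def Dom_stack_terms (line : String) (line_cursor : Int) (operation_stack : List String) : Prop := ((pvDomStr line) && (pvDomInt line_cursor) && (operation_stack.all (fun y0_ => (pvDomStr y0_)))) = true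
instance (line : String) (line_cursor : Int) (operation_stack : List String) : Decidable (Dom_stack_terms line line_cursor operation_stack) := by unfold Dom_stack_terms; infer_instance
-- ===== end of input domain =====

-- A recurses once per leading prefix operator; B replaces that linear recursion by an
-- iterative operator-skipping pass plus one base-term step (alternative decomposition,
-- same cost). Both Pythons also append to operation_stack in place identically; the
-- equivalence proved here is about the RETURN value (the new cursor) only.


-- helpers shared by both sources (B's Python keeps A's is_operator and, verbatim, A's
-- parenthesis-depth for loop, so the scan is one shared helper)
def pvIsOperator (c : Char) : Bool := ['+', '-', '*', '/', '^'].contains c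
def pvIsParenthesis (c : Char) : Bool := c = '(' || c = ')'
def pvIsOperand (c : Char) : Bool := !pvIsOperator c && !pvIsParenthesis c

-- the 'for char in line[line_cursor:]' loop with break; 'sub_expression += line[line_cursor]'
-- reads the string at the lockstep cursor (the .getD arm is Python's IndexError point,
-- unreachable because cursor stays in lockstep with the slice)
def pvParenScan (line : String) (chars : List Char) (cursor depth : Int) (sub : List Char) : Int :=
  match chars with
  | [] => cursor
  | ch :: rest =>
    if ch = '(' then pvParenScan line rest (cursor + 1) (depth + 1) sub
    else if ch = ')' && depth = 1 then cursor + 1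
    else if ch = ')' then pvParenScan line rest (cursor + 1) (depth - 1) sub
    else pvParenScan line rest (cursor + 1) depth
           (sub ++ [(PySem.List.pyGet? line.toList cursor).getD ch])

-- ===== PORT A =====
def stack_terms (line : String) (line_cursor : Int) (operation_stack : List String) : Int :=
  match h : PySem.List.pyGet? line.toList line_cursor with
  | none => line_cursor   -- Python raises IndexError here (outside Pre_)
  | some ch =>
    if pvIsOperand ch then line_cursor + 1
    else if pvIsOperator ch then stack_terms line (line_cursor + 1) operation_stack
    else pvParenScan line (PySem.List.slice line.toList (some (line_cursor + 1)) none)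
           (line_cursor + 1) 1 []
termination_by ((line.toList.length : Int) - line_cursor).toNat
decreasing_by
  have hin : PySem.Raise.InRange line.toList.length line_cursor := by
    by_contra hn
    rw [← PySem.List.pyGet?_eq_none_iff] at hn
    simp [hn] at h
  simp [PySem.Raise.InRange] at hin
  have hlen : line.toList.length = line.length := by simp
  omega

-- ===== PORT B =====
-- 'while is_operator(line[line_cursor]): … line_cursor += 1' (the local operator list
-- does not affect the returned cursor; the none arm is the IndexError in the condition)
def pvSkipOperators (line : String) (cursor : Int) : Int :=
  match h : PySem.List.pyGet? line.toList cursor with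
  | none => cursor
  | some ch => if pvIsOperator ch then pvSkipOperators line (cursor + 1) else cursor
termination_by ((line.toList.length : Int) - cursor).toNat
decreasing_by
  have hin : PySem.Raise.InRange line.toList.length cursor := by
    by_contra hn
    rw [← PySem.List.pyGet?_eq_none_iff] at hn
    simp [hn] at h
  simp [PySem.Raise.InRange] at hin
  have hlen : line.toList.length = line.length := by simp
  omega

-- the base term after the operator chain: operand, or the parenthesis scan
def pvAltBase (line : String) (cursor : Int) : Int :=
  match PySem.List.pyGet? line.toList cursor with
  | none => cursor   -- Python raises IndexError here (outside Pre_)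
  | some ch =>
    if !pvIsParenthesis ch then cursor + 1
    else pvParenScan line (PySem.List.slice line.toList (some (cursor + 1)) none)
           (cursor + 1) 1 []

def stack_terms_alt (line : String) (line_cursor : Int) (operation_stack : List String) : Int :=
  pvAltBase line (pvSkipOperators line line_cursor)

-- ===== PRECONDITION & SPEC =====
-- Pre_: exactly the inputs where Python A returns (no IndexError): the start index is a
-- valid Python index of line, and the operator chain stops before running off the end —
-- for a nonnegative cursor some char from it on is a non-operator; for a negative cursor
-- (Python wraps it, and the incremented cursor can re-enter the string front at 0) some
-- char of the whole string is a non-operator.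
def Pre_stack_terms (line : String) (line_cursor : Int) (operation_stack : List String) : Prop :=
  PySem.Raise.InRange line.toList.length line_cursor ∧
  (if 0 ≤ line_cursor
   then (line.toList.drop line_cursor.toNat).any (fun c => !pvIsOperator c)
   else line.toList.any (fun c => !pvIsOperator c)) = true
instance (line : String) (line_cursor : Int) (operation_stack : List String) : Decidable (Pre_stack_terms line line_cursor operation_stack) := by unfold Pre_stack_terms; infer_instance

def pvWitness_stack_terms : String × Int × List String := ("+a b", 0, ["x"])

def Spec_stack_terms (line : String) (line_cursor : Int) (operation_stack : List String) (out : Int) : Prop := out = stack_terms_alt line line_cursor operation_stack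
instance (line : String) (line_cursor : Int) (operation_stack : List String) (out : Int) : Decidable (Spec_stack_terms line line_cursor operation_stack out) := by unfold Spec_stack_terms; infer_instance

-- ===== CLAIM (what is proved, stated in full; the proofs are below) =====
def Claim_equal_stack_terms : Prop := ∀ (line : String) (line_cursor : Int) (operation_stack : List String), Dom_stack_terms line line_cursor operation_stack → Pre_stack_terms line line_cursor operation_stack → Spec_stack_terms line line_cursor operation_stack (stack_terms line line_cursor operation_stack)

-- ===== LEMMAS AND PROOFS =====

-- the two ports agree on EVERY input (both return the raising cursor unchanged at the
-- IndexError point), proved by strong induction on how far the cursor is from the end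
-- of the string; Pre_ is not needed for it

theorem pvSkipOperators_none (line : String) (c : Int)
    (h : PySem.List.pyGet? line.toList c = none) : pvSkipOperators line c = c := by
  rw [pvSkipOperators]
  split
  · rfl
  · next ch heq => rw [heq] at h; cases h

theorem pvSkipOperators_not_op (line : String) (c : Int) (ch : Char)
    (h : PySem.List.pyGet? line.toList c = some ch) (hnop : pvIsOperator ch = false) :
    pvSkipOperators line c = c := by
  rw [pvSkipOperators]
  split
  · rfl
  · next ch' heq => rw [heq] at h; cases h; simp [hnop]

theorem pvSkipOperators_op (line : String) (c : Int) (ch : Char)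
    (h : PySem.List.pyGet? line.toList c = some ch) (hop : pvIsOperator ch = true) :
    pvSkipOperators line c = pvSkipOperators line (c + 1) := by
  conv_lhs => rw [pvSkipOperators]
  split
  · next heq => rw [heq] at h; cases h
  · next ch' heq => rw [heq] at h; cases h; simp [hop]

theorem stack_terms_eq_alt_fuel (line : String) :
    ∀ (k : Nat) (c : Int) (s : List String),
      ((line.toList.length : Int) - c).toNat ≤ k →
      stack_terms line c s = stack_terms_alt line c s := by
  intro k
  induction k with
  | zero =>
    intro c s hk
    have hnone : PySem.List.pyGet? line.toList c = none := by
      rw [PySem.List.pyGet?_eq_none_iff]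
      simp [PySem.Raise.InRange]
      have hlen : line.toList.length = line.length := by simp
      omega
    rw [stack_terms]
    unfold stack_terms_alt pvAltBase
    rw [pvSkipOperators_none line c hnone]
    split
    · next heq => simp [hnone]
    · next ch heq => rw [heq] at hnone; cases hnone
  | succ k ih =>
    intro c s hk
    rw [stack_terms]
    split
    · next h =>
      unfold stack_terms_alt pvAltBase
      rw [pvSkipOperators_none line c h]
      simp [h]
    · next ch h =>
      have hlt : c < (line.toList.length : Int) := by
        have hin : PySem.Raise.InRange line.toList.length c := by
          by_contra hn
          rw [← PySem.List.pyGet?_eq_none_iff] at hn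
          simp [hn] at h
        simp [PySem.Raise.InRange] at hin
        have hlen : line.toList.length = line.length := by simp
        omega
      by_cases hoprnd : pvIsOperand ch = true
      · have hnop : pvIsOperator ch = false := by
          simp [pvIsOperand] at hoprnd; simp [hoprnd.1]
        have hnpar : pvIsParenthesis ch = false := by
          simp [pvIsOperand] at hoprnd; simp [hoprnd.2]
        unfold stack_terms_alt pvAltBase
        rw [pvSkipOperators_not_op line c ch h hnop]
        simp [h, hoprnd, hnpar]
      · by_cases hop : pvIsOperator ch = true
        · have ihc := ih (c + 1) s (by omega)
          rw [if_neg (by simp [hoprnd]), if_pos hop, ihc]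
          unfold stack_terms_alt
          rw [pvSkipOperators_op line c ch h hop]
        · have hnop : pvIsOperator ch = false := by simp [Bool.not_eq_true] at hop; exact hop
          have hpar : pvIsParenthesis ch = true := by
            simp [pvIsOperand] at hoprnd
            simpa [hnop] using hoprnd
          unfold stack_terms_alt pvAltBase
          rw [pvSkipOperators_not_op line c ch h hnop]
          simp [h, hoprnd, hop, hpar]

theorem stack_terms_eq_alt (line : String) (line_cursor : Int) (operation_stack : List String) :
    stack_terms line line_cursor operation_stack = stack_terms_alt line line_cursor operation_stack := by
  exact stack_terms_eq_alt_fuel line ((line.toList.length : Int) - line_cursor).toNat line_cursor operation_stack le_rfl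

-- ===== VERDICT (by name: the statement is the Claim_ definition above) =====
theorem stack_terms_spec : Claim_equal_stack_terms := by
  intro line c s _ _
  unfold Spec_stack_terms
  exact stack_terms_eq_alt line c s
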